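-- pv_equiv track=rewrite | github.com/minseojeong1012/codetree-TILs | 240319/기울어진 직사각형/slanted-rectangle.py | generate_rect_list
-- ===== SOURCE A (Python) =====
-- from copy import deepcopy
--
-- def generate_rect_list(l):
--     rect_list = []
--
--     d_list = [
--         [-1, 1],
--         [-1, -1],
--         [1, -1],
--         [1, 1]
--     ]
--
--     def in_range(row, col):
--         if row < 0 or l <= row:
--             return False
--         if col < 0 or l <= col:
--             return False
--         return True
--
--     def dfs(piv, end_point, cur_point, rect):
--         row, col = cur_point
--         rect[row][col] = 1
--
--         if piv == len(d_list):
--             rect[row][col] = 0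
--             return
--
--         end_row, end_col = end_point
--         a_row, a_col = d_list[piv]
--         n_row = row + a_row
--         n_col = col + a_col
--
--         if end_row == n_row and end_col == n_col:
--             rect_list.append(deepcopy(rect))
--             rect[row][col] = 0
--             return
--
--         if not in_range(n_row, n_col):
--             rect[row][col] = 0
--             return
--
--         if rect[n_row][n_col]:
--             rect[row][col] = 0
--             return
--
--         dfs(piv + 1, end_point, [n_row, n_col], rect)
--         dfs(piv, end_point, [n_row, n_col], rect)
--
--         rect[row][col] = 0
--
--     for row in range(l - 1, 0, -1):
--         for col in range(1, l):
--
--             rect = [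
--                 [0] * l
--                 for _ in range(l)
--             ]
--
--             dfs(0, [row, col], [row, col], rect)
--
--     return rect_list
-- ===== SOURCE B (Python) =====
-- def generate_rect_list(l):
--     # Direct enumeration: for each pivot, loop over the two side lengths a, b
--     # and trace the four edges of the slanted rectangle into a fresh mask.
--     rect_list = []
--     for row in range(l - 1, 0, -1):
--         for col in range(1, l):
--             for a in range(1, min(row, l - 1 - col) + 1):
--                 for b in range(1, min(row - a, col) + 1):
--                     mask = [[0] * l for _ in range(l)]
--                     r, c = row, col
--                     for (dr, dc), steps in (((-1, 1), a), ((-1, -1), b), ((1, -1), a), ((1, 1), b)):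
--                         for _ in range(steps):
--                             mask[r][c] = 1
--                             r += dr
--                             c += dc
--                     rect_list.append(mask)
--     return rect_list
-- ===== Notes on version B (the rewrite author's own statement) =====
-- stated objective: faster
-- what changed: Replaces the DFS backtracking over a shared mutable grid (with deepcopy on every emission) by a direct four-level loop that enumerates the pivot and the two side lengths a,b under closed-form range bounds and traces each rectangle's four edges into a fresh mask.
import Mathlib
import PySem

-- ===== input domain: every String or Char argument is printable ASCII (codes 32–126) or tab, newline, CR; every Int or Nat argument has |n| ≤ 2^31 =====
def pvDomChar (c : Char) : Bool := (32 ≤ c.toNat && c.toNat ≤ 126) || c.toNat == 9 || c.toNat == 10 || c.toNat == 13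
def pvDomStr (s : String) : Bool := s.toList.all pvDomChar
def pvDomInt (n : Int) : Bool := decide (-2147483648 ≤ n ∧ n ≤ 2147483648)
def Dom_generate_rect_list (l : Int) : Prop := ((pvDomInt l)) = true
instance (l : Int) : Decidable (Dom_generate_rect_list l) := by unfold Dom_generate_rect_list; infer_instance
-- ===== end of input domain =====

-- B replaces A's DFS backtracking (shared mutable grid + deepcopy) by a direct loop
-- over the pivot and the two side lengths, tracing each rectangle's edges into a
-- fresh mask; B is intended to be faster by a constant factor (no dead branches,
-- no deepcopy).

-- ===== PORT A =====
-- rect[r][c] = v  /  rect[r][c]  — every access A performs is with 0 ≤ r,c < l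
-- (the top-level pivots are in range and every other access is behind in_range),
-- so plain .toNat indexing is exact here.
def pvSetCell (g : List (List Int)) (r c v : Int) : List (List Int) :=
  g.set r.toNat ((g.getD r.toNat []).set c.toNat v)

def pvGetCell (g : List (List Int)) (r c : Int) : Int :=
  (g.getD r.toNat []).getD c.toNat 0

def pvInRange (l r c : Int) : Bool := decide (0 ≤ r ∧ r < l ∧ 0 ≤ c ∧ c < l)

def pvDlist : List (Int × Int) := [(-1,1),(-1,-1),(1,-1),(1,1)]

def pvZeroRect (l : Int) : List (List Int) :=
  List.replicate l.toNat (List.replicate l.toNat 0)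

-- A's dfs: Python mutates `rect` and always restores it before returning, and the
-- appended deepcopy equals `rect` with the current cell marked; so the pure port
-- passes rect (with the current cell marked) down and returns the appended masks.
-- `fuel` only makes the recursion total; it is chosen large enough (proved below).
def pvDfs (l : Int) (endp : Int × Int) : Nat → Nat → (Int × Int) → List (List Int) → List (List (List Int))
  | 0, _, _, _ => []
  | f+1, piv, cur, rect =>
    let rect1 := pvSetCell rect cur.1 cur.2 1
    if piv = 4 then []
    else
      let d := pvDlist.getD piv (0,0)
      let n : Int × Int := (cur.1 + d.1, cur.2 + d.2)
      if endp = n then [rect1]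
      else if pvInRange l n.1 n.2 = false then []
      else if pvGetCell rect1 n.1 n.2 ≠ 0 then []
      else pvDfs l endp f (piv+1) n rect1 ++ pvDfs l endp f piv n rect1

def generate_rect_list (l : Int) : List (List (List Int)) :=
  (PySem.List.pyRange (l-1) 0 (-1)).foldl (fun acc row =>
    (PySem.List.pyRange 1 l 1).foldl (fun acc col =>
      acc ++ pvDfs l (row, col) (2*l + 8).toNat 0 (row, col) (pvZeroRect l)) acc) []

-- ===== PORT B =====
-- mark `steps` cells from (r,c) walking in direction (dr,dc); returns grid and end point
def pvRun (g : List (List Int)) (r c dr dc : Int) : Nat → (List (List Int)) × (Int × Int)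
  | 0 => (g, (r, c))
  | n+1 => pvRun (pvSetCell g r c 1) (r+dr) (c+dc) dr dc n

def pvMask (l R C a b : Int) : List (List Int) :=
  ([((-1,1), a.toNat), ((-1,-1), b.toNat), ((1,-1), a.toNat), ((1,1), b.toNat)].foldl
    (fun st q => pvRun st.1 st.2.1 st.2.2 q.1.1 q.1.2 q.2)
    (pvZeroRect l, ((R : Int), (C : Int)))).1

def generate_rect_list_alt (l : Int) : List (List (List Int)) :=
  (PySem.List.pyRange (l-1) 0 (-1)).foldl (fun acc row =>
    (PySem.List.pyRange 1 l 1).foldl (fun acc col =>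
      (PySem.List.pyRange 1 (min row (l-1-col) + 1) 1).foldl (fun acc a =>
        (PySem.List.pyRange 1 (min (row-a) col + 1) 1).foldl (fun acc b =>
          acc ++ [pvMask l row col a b]) acc) acc) acc) []

-- ===== PRECONDITION & SPEC =====
def Spec_generate_rect_list (l : Int) (out : List (List (List Int))) : Prop := out = generate_rect_list_alt l
instance (l : Int) (out : List (List (List Int))) : Decidable (Spec_generate_rect_list l out) := by unfold Spec_generate_rect_list; infer_instance

-- ===== CLAIM (what is proved, stated in full; the proofs are below) =====
def Claim_equal_generate_rect_list : Prop := ∀ (l : Int), Dom_generate_rect_list l → Spec_generate_rect_list l (generate_rect_list l)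

-- ===== LEMMAS AND PROOFS =====

-- an l×l grid of 0/1 described by a predicate on (row, col)
def pvMark (l : Int) (P : Int → Int → Bool) : List (List Int) :=
  (List.range l.toNat).map (fun r : Nat => (List.range l.toNat).map (fun c : Nat => if P (r : Int) (c : Int) then 1 else 0))

-- the n cells from (pr,pc) walking in direction (dr,dc)
def pvSeg (pr pc dr dc : Int) (n : Nat) : List (Int × Int) :=
  (List.range n).map (fun i : Nat => (pr + dr*(i : Int), pc + dc*(i : Int)))

def pvMem (L : List (Int × Int)) : Int → Int → Bool := fun r c => decide ((r, c) ∈ L)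

-- path-prefix mark sets of A's dfs (legs 0..3 of the rectangle at pivot (R,C), sides a,b)
def pvS1 (R C a : Int) (m : Nat) : List (Int × Int) :=
  pvSeg R C (-1) 1 a.toNat ++ pvSeg (R-a) (C+a) (-1) (-1) m
def pvS2 (R C a b : Int) (k : Nat) : List (Int × Int) :=
  pvS1 R C a b.toNat ++ pvSeg (R-a-b) (C+a-b) 1 (-1) k
def pvS3 (R C a b : Int) (j : Nat) : List (Int × Int) :=
  pvS2 R C a b a.toNat ++ pvSeg (R-b) (C-b) 1 1 j
def pvCells (R C a b : Int) : List (Int × Int) := pvS3 R C a b b.toNat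

theorem pvMark_congr {l : Int} {P Q : Int → Int → Bool}
    (h : ∀ r c : Int, 0 ≤ r → r < l → 0 ≤ c → c < l → P r c = Q r c) :
    pvMark l P = pvMark l Q := by
  unfold pvMark
  refine List.map_congr_left (fun r hr => ?_)
  refine List.map_congr_left (fun c hc => ?_)
  rw [List.mem_range] at hr hc
  rw [h r c (by positivity) (by omega) (by positivity) (by omega)]

theorem pvZeroRect_eq_mark (l : Int) : pvZeroRect l = pvMark l (fun _ _ => false) := by
  unfold pvZeroRect pvMark
  simp [List.map_const']

theorem pvSetCell_mark (l : Int) (P : Int → Int → Bool) (r c : Int)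
    (hr0 : 0 ≤ r) (hrl : r < l) (hc0 : 0 ≤ c) (hcl : c < l) :
    pvSetCell (pvMark l P) r c 1 =
      pvMark l (fun r' c' => P r' c' || ((r' == r) && (c' == c))) := by
  have hrn : r.toNat < l.toNat := by omega
  have hcn : c.toNat < l.toNat := by omega
  have er : ((r.toNat : Int)) = r := Int.toNat_of_nonneg hr0
  have ec : ((c.toNat : Int)) = c := Int.toNat_of_nonneg hc0
  unfold pvSetCell pvMark
  apply List.ext_getElem
  · simp
  · intro i hi1 hi2
    have hi : i < l.toNat := by simpa using hi2
    rw [List.getElem_set]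
    by_cases hir : r.toNat = i
    · rw [if_pos hir]
      subst hir
      rw [List.getD_eq_getElem _ _ (by simp only [List.length_map, List.length_range]; exact hrn)]
      simp only [List.getElem_map, List.getElem_range, er]
      apply List.ext_getElem
      · simp
      · intro j hj1 hj2
        have hj : j < l.toNat := by simpa using hj2
        rw [List.getElem_set]
        simp only [List.getElem_map, List.getElem_range]
        by_cases hjc : c.toNat = j
        · rw [if_pos hjc]
          subst hjc
          simp [ec]
        · rw [if_neg hjc]
          have hb : ((j : Int) == c) = false := by simp; omega
          simp [hb]
    · rw [if_neg hir]
      simp only [List.getElem_map, List.getElem_range]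
      have hb : ((i : Int) == r) = false := by simp; omega
      simp [hb]

theorem pvGetCell_mark (l : Int) (P : Int → Int → Bool) (r c : Int)
    (hr0 : 0 ≤ r) (hrl : r < l) (hc0 : 0 ≤ c) (hcl : c < l) :
    pvGetCell (pvMark l P) r c = if P r c then 1 else 0 := by
  have hrn : r.toNat < l.toNat := by omega
  have hcn : c.toNat < l.toNat := by omega
  have er : ((r.toNat : Int)) = r := Int.toNat_of_nonneg hr0
  have ec : ((c.toNat : Int)) = c := Int.toNat_of_nonneg hc0
  have hrow : (pvMark l P).getD r.toNat [] =
      List.map (fun c : Nat => if P r (c : Int) then 1 else 0) (List.range l.toNat) := by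
    unfold pvMark
    rw [List.getD_eq_getElem _ _ (by simp only [List.length_map, List.length_range]; exact hrn)]
    simp only [List.getElem_map, List.getElem_range, er]
  unfold pvGetCell
  rw [hrow]
  rw [List.getD_eq_getElem _ _ (by simp only [List.length_map, List.length_range]; exact hcn)]
  simp only [List.getElem_map, List.getElem_range, ec]

theorem pvMem_seg (pr pc dr dc : Int) (n : Nat) (r c : Int) :
    (r, c) ∈ pvSeg pr pc dr dc n ↔ ∃ i : Nat, i < n ∧ r = pr + dr*(i:Int) ∧ c = pc + dc*(i:Int) := by
  simp only [pvSeg, List.mem_map]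
  constructor
  · rintro ⟨i, hi, h⟩
    rw [List.mem_range] at hi
    rw [Prod.mk.injEq] at h
    exact ⟨i, hi, h.1.symm, h.2.symm⟩
  · rintro ⟨i, hi, h1, h2⟩
    exact ⟨i, List.mem_range.mpr hi, by rw [Prod.mk.injEq]; exact ⟨h1.symm, h2.symm⟩⟩

theorem pvSeg_succ (pr pc dr dc : Int) (n : Nat) :
    pvSeg pr pc dr dc (n+1) = (pr, pc) :: pvSeg (pr+dr) (pc+dc) dr dc n := by
  unfold pvSeg
  rw [List.range_succ_eq_map]
  simp only [List.map_cons, List.map_map, Int.natCast_zero, mul_zero, add_zero]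
  refine congrArg₂ List.cons rfl (List.map_congr_left fun i _ => ?_)
  simp only [Function.comp_apply, Prod.mk.injEq]
  push_cast
  constructor <;> ring

theorem pvRun_spec (dr dc : Int) (n : Nat) :
    ∀ (g : List (List Int)) (r c : Int),
    pvRun g r c dr dc n =
      ((pvSeg r c dr dc n).foldl (fun g' p => pvSetCell g' p.1 p.2 1) g,
       (r + dr*(n:Int), c + dc*(n:Int))) := by
  induction n with
  | zero =>
    intro g r c
    simp [pvRun, pvSeg]
  | succ n ih =>
    intro g r c
    rw [pvSeg_succ]
    simp only [pvRun, List.foldl_cons, ih]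
    refine congrArg₂ Prod.mk rfl ?_
    simp only [Prod.mk.injEq]
    push_cast
    constructor <;> ring

theorem pvFoldl_set_mark (l : Int) :
    ∀ (L : List (Int × Int)) (P : Int → Int → Bool),
    (∀ p ∈ L, 0 ≤ p.1 ∧ p.1 < l ∧ 0 ≤ p.2 ∧ p.2 < l) →
    L.foldl (fun g p => pvSetCell g p.1 p.2 1) (pvMark l P) =
      pvMark l (fun r c => P r c || pvMem L r c) := by
  intro L
  induction L with
  | nil =>
    intro P _
    simp only [List.foldl_nil]
    apply pvMark_congr
    intro r c _ _ _ _
    simp [pvMem]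
  | cons p L ih =>
    intro P h
    obtain ⟨h1, h2, h3, h4⟩ := h p List.mem_cons_self
    simp only [List.foldl_cons]
    rw [pvSetCell_mark l P p.1 p.2 h1 h2 h3 h4]
    rw [ih _ (fun q hq => h q (List.mem_cons_of_mem _ hq))]
    apply pvMark_congr
    intro r c _ _ _ _
    rcases p with ⟨pr, pc⟩
    rw [Bool.eq_iff_iff]
    simp only [pvMem, Bool.or_eq_true, decide_eq_true_eq, Bool.and_eq_true, beq_iff_eq,
      List.mem_cons, Prod.mk.injEq]
    tauto

theorem pvCells_inRange (l R C a b : Int)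
    (ha : 1 ≤ a) (hb : 1 ≤ b) (h1 : 0 ≤ R - a - b) (h2 : 0 ≤ C - b)
    (h3 : C + a < l) (h4 : R < l) :
    ∀ p ∈ pvCells R C a b, 0 ≤ p.1 ∧ p.1 < l ∧ 0 ≤ p.2 ∧ p.2 < l := by
  intro p hp
  rcases p with ⟨r, c⟩
  simp only [pvCells, pvS3, pvS2, pvS1, List.mem_append] at hp
  rcases hp with ((h | h) | h) | h <;> rw [pvMem_seg] at h <;>
    obtain ⟨i, hi, e1, e2⟩ := h <;> subst e1 <;> subst e2 <;>
    exact ⟨by omega, by omega, by omega, by omega⟩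

theorem pvMask_eq (l R C a b : Int)
    (ha : 1 ≤ a) (hb : 1 ≤ b) (h1 : 0 ≤ R - a - b) (h2 : 0 ≤ C - b)
    (h3 : C + a < l) (h4 : R < l) :
    pvMask l R C a b = pvMark l (pvMem (pvCells R C a b)) := by
  have ea : ((a.toNat : Int)) = a := Int.toNat_of_nonneg (by omega)
  have eb : ((b.toNat : Int)) = b := Int.toNat_of_nonneg (by omega)
  unfold pvMask
  simp only [List.foldl_cons, List.foldl_nil]
  rw [pvRun_spec]
  simp only []
  rw [pvRun_spec]
  simp only []
  rw [pvRun_spec]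
  simp only []
  rw [pvRun_spec]
  simp only [ea, eb]
  have e0 : R + -1 * a = R - a := by ring
  have e1 : C + 1 * a = C + a := by ring
  have e2 : R - a + -1 * b = R - a - b := by ring
  have e3 : C + a + -1 * b = C + a - b := by ring
  have e4 : R - a - b + 1 * a = R - b := by ring
  have e5 : C + a - b + -1 * a = C - b := by ring
  rw [e0, e1, e2, e3, e4, e5]
  rw [pvZeroRect_eq_mark]
  have hcat : (pvCells R C a b).foldl (fun g' p => pvSetCell g' p.1 p.2 1) (pvMark l fun _ _ => false)
      = (pvSeg (R-b) (C-b) 1 1 b.toNat).foldl (fun g' p => pvSetCell g' p.1 p.2 1)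
        ((pvSeg (R-a-b) (C+a-b) 1 (-1) a.toNat).foldl (fun g' p => pvSetCell g' p.1 p.2 1)
          ((pvSeg (R-a) (C+a) (-1) (-1) b.toNat).foldl (fun g' p => pvSetCell g' p.1 p.2 1)
            ((pvSeg R C (-1) 1 a.toNat).foldl (fun g' p => pvSetCell g' p.1 p.2 1)
              (pvMark l fun _ _ => false)))) := by
    simp only [pvCells, pvS3, pvS2, pvS1, List.foldl_append]
  rw [← hcat]
  rw [pvFoldl_set_mark l (pvCells R C a b) _ (pvCells_inRange l R C a b ha hb h1 h2 h3 h4)]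
  apply pvMark_congr
  intro r c _ _ _ _
  simp

theorem pvDfs_four (l : Int) (endp : Int × Int) (f : Nat) (cur : Int × Int) (rect : List (List Int)) :
    pvDfs l endp f 4 cur rect = [] := by
  cases f with
  | zero => rfl
  | succ f => simp [pvDfs]

-- leg-3 walks (direction (1,1)) that are not on the closing diagonal emit nothing,
-- whatever the grid contents
theorem pvDfs3_fail (l R C : Int) :
    ∀ (f : Nat) (cur : Int × Int) (rect : List (List Int)),
    cur.1 - cur.2 ≠ R - C → pvDfs l (R, C) f 3 cur rect = [] := by
  intro f
  induction f with
  | zero => intro cur rect _; rfl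
  | succ f ih =>
    intro cur rect h
    simp only [pvDfs, pvDlist, List.getD_cons_succ, List.getD_cons_zero]
    rw [if_neg (by decide : ¬(3 = 4))]
    rw [if_neg (show ¬((R, C) = ((cur.1 + 1, cur.2 + 1) : Int × Int)) from by
      simp only [Prod.mk.injEq]; omega)]
    by_cases hr : pvInRange l (cur.1 + 1) (cur.2 + 1) = false
    · rw [if_pos hr]
    · rw [if_neg hr]
      by_cases hm : pvGetCell (pvSetCell rect cur.1 cur.2 1) (cur.1 + 1) (cur.2 + 1) ≠ 0
      · rw [if_pos hm]
      · rw [if_neg hm]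
        rw [pvDfs_four, ih (cur.1 + 1, cur.2 + 1) _ (by simp; omega)]
        rfl

-- leg-2 walks (direction (1,-1)) strictly below the closing diagonal emit nothing
theorem pvDfs2_fail (l R C : Int) :
    ∀ (f : Nat) (cur : Int × Int) (rect : List (List Int)),
    R - C ≤ cur.1 - cur.2 → pvDfs l (R, C) f 2 cur rect = [] := by
  intro f
  induction f with
  | zero => intro cur rect _; rfl
  | succ f ih =>
    intro cur rect h
    simp only [pvDfs, pvDlist, List.getD_cons_succ, List.getD_cons_zero]
    rw [if_neg (by decide : ¬(2 = 4))]
    rw [if_neg (show ¬((R, C) = ((cur.1 + 1, cur.2 + -1) : Int × Int)) from by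
      simp only [Prod.mk.injEq]; omega)]
    by_cases hr : pvInRange l (cur.1 + 1) (cur.2 + -1) = false
    · rw [if_pos hr]
    · rw [if_neg hr]
      by_cases hm : pvGetCell (pvSetCell rect cur.1 cur.2 1) (cur.1 + 1) (cur.2 + -1) ≠ 0
      · rw [if_pos hm]
      · rw [if_neg hm]
        rw [pvDfs3_fail l R C f _ _ (by simp; omega), ih (cur.1 + 1, cur.2 + -1) _ (by simp; omega)]
        rfl

-- leg-2 walks on a sum-line R+C-2b with b > C emit nothing: the only turn cell on
-- the closing diagonal would have a negative column, so no turn ever succeeds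
theorem pvDfs2_fail2 (l R C b : Int) (hb : 1 ≤ b) (hCb : C < b) :
    ∀ (f : Nat) (cur : Int × Int) (rect : List (List Int)),
    cur.1 + cur.2 = R + C - 2*b → pvDfs l (R, C) f 2 cur rect = [] := by
  intro f
  induction f with
  | zero => intro cur rect _; rfl
  | succ f ih =>
    intro cur rect h
    simp only [pvDfs, pvDlist, List.getD_cons_succ, List.getD_cons_zero]
    rw [if_neg (by decide : ¬(2 = 4))]
    rw [if_neg (show ¬((R, C) = ((cur.1 + 1, cur.2 + -1) : Int × Int)) from by
      simp only [Prod.mk.injEq]; omega)]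
    by_cases hr : pvInRange l (cur.1 + 1) (cur.2 + -1) = false
    · rw [if_pos hr]
    · rw [if_neg hr]
      have hr' : pvInRange l (cur.1 + 1) (cur.2 + -1) = true := by
        cases hx : pvInRange l (cur.1 + 1) (cur.2 + -1) with
        | false => exact absurd hx hr
        | true => rfl
      have hcol : 0 ≤ cur.2 + -1 := by
        simp only [pvInRange, decide_eq_true_eq] at hr'
        exact hr'.2.2.1
      by_cases hm : pvGetCell (pvSetCell rect cur.1 cur.2 1) (cur.1 + 1) (cur.2 + -1) ≠ 0
      · rw [if_pos hm]
      · rw [if_neg hm]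
        rw [pvDfs3_fail l R C f _ _ (by simp; omega), ih (cur.1 + 1, cur.2 + -1) _ (by simp; omega)]
        rfl

theorem pvSeg_snoc (pr pc dr dc : Int) (n : Nat) :
    pvSeg pr pc dr dc (n+1) = pvSeg pr pc dr dc n ++ [(pr + dr*(n:Int), pc + dc*(n:Int))] := by
  unfold pvSeg
  rw [List.range_succ, List.map_append, List.map_singleton]

theorem pvMem_snoc (L : List (Int × Int)) (x y r c : Int) :
    (pvMem L r c || ((r == x) && (c == y))) = pvMem (L ++ [(x, y)]) r c := by
  rw [Bool.eq_iff_iff]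
  simp only [pvMem, Bool.or_eq_true, decide_eq_true_eq, Bool.and_eq_true, beq_iff_eq,
    List.mem_append, List.mem_singleton, Prod.mk.injEq]

theorem pvS3_succ (R C a b : Int) (j : Nat) :
    pvS3 R C a b (j+1) = pvS3 R C a b j ++ [(R - b + (j:Int), C - b + (j:Int))] := by
  simp only [pvS3, pvSeg_snoc, one_mul, ← List.append_assoc]

-- the successful leg-3 ray: from the j-th cell of leg 3 with the path prefix marked,
-- the walk reaches the pivot and emits exactly the full-rectangle mask
theorem pvDfs3_succ (l R C a b : Int)
    (hRl : R < l) (hC1 : 1 ≤ C) (hCl : C < l) (ha : 1 ≤ a) (hb : 1 ≤ b)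
    (hab : 0 ≤ R - a - b) (hCb : 0 ≤ C - b) (hCa : C + a < l) :
    ∀ (f : Nat) (j : Nat), (j : Int) ≤ b - 1 → b - (j:Int) + 2 ≤ (f:Int) →
    pvDfs l (R, C) f 3 (R - b + (j:Int), C - b + (j:Int)) (pvMark l (pvMem (pvS3 R C a b j)))
      = [pvMark l (pvMem (pvCells R C a b))] := by
  intro f
  induction f with
  | zero => intro j hj hf; exfalso; simp at hf; omega
  | succ f ih =>
    intro j hj hf
    simp only [pvDfs, pvDlist, List.getD_cons_succ, List.getD_cons_zero]
    rw [if_neg (by decide : ¬(3 = 4))]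
    rw [pvSetCell_mark l _ _ _ (by omega) (by omega) (by omega) (by omega)]
    have hmk : pvMark l (fun r' c' => pvMem (pvS3 R C a b j) r' c' ||
        ((r' == R - b + (j:Int)) && (c' == C - b + (j:Int)))) =
        pvMark l (pvMem (pvS3 R C a b (j+1))) := by
      apply pvMark_congr
      intro r c _ _ _ _
      rw [pvMem_snoc, ← pvS3_succ]
    rw [hmk]
    by_cases hend : (j : Int) = b - 1
    · rw [if_pos (show ((R:Int), (C:Int)) = (R - b + (j:Int) + 1, C - b + (j:Int) + 1) from by
        simp only [Prod.mk.injEq]; omega)]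
      have : j + 1 = b.toNat := by omega
      rw [this]
      rfl
    · rw [if_neg (show ¬(((R:Int), (C:Int)) = (R - b + (j:Int) + 1, C - b + (j:Int) + 1)) from by
        simp only [Prod.mk.injEq]; omega)]
      rw [if_neg (show ¬(pvInRange l (R - b + (j:Int) + 1) (C - b + (j:Int) + 1) = false) from by
        simp only [pvInRange]
        simp only [decide_eq_false_iff_not]
        push_neg
        omega)]
      have hmem : pvMem (pvS3 R C a b (j+1)) (R - b + (j:Int) + 1) (C - b + (j:Int) + 1) = false := by
        simp only [pvMem, decide_eq_false_iff_not, pvS3, pvS2, pvS1, List.mem_append, pvMem_seg]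
        intro h
        rcases h with (((⟨i,hi,e1,e2⟩|⟨i,hi,e1,e2⟩)|⟨i,hi,e1,e2⟩)|⟨i,hi,e1,e2⟩) <;> omega
      have hget : pvGetCell (pvMark l (pvMem (pvS3 R C a b (j+1))))
          (R - b + (j:Int) + 1) (C - b + (j:Int) + 1) = 0 := by
        rw [pvGetCell_mark l _ _ _ (by omega) (by omega) (by omega) (by omega), hmem]
        simp
      rw [if_neg (show ¬(pvGetCell (pvMark l (pvMem (pvS3 R C a b (j+1))))
          (R - b + (j:Int) + 1) (C - b + (j:Int) + 1) ≠ 0) from by simp [hget])]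
      rw [pvDfs_four]
      have e : ((R : Int) - b + (j:Int) + 1, (C:Int) - b + (j:Int) + 1) =
          ((R : Int) - b + ((j+1 : Nat):Int), (C:Int) - b + ((j+1 : Nat):Int)) := by
        simp only [Prod.mk.injEq]; push_cast; omega
      rw [e, ih (j+1) (by push_cast; omega) (by push_cast; omega)]
      rfl

theorem pvS2_succ (R C a b : Int) (k : Nat) :
    pvS2 R C a b (k+1) = pvS2 R C a b k ++ [(R - a - b + (k:Int), C + a - b - (k:Int))] := by
  simp only [pvS2, pvSeg_snoc, one_mul, neg_one_mul, ← sub_eq_add_neg, ← List.append_assoc]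

theorem pvSeg_zero (pr pc dr dc : Int) : pvSeg pr pc dr dc 0 = [] := by
  simp [pvSeg]

-- past the far corner, the leg-2 walk over the fully marked prefix emits nothing
theorem pvDfs2_end (l R C a b : Int)
    (hRl : R < l) (hCl : C < l) (ha : 1 ≤ a) (hb : 1 ≤ b)
    (hab : 0 ≤ R - a - b) (hCb : 0 ≤ C - b) (hCa : C + a < l) :
    ∀ (f : Nat),
    pvDfs l (R, C) f 2 (R - b, C - b) (pvMark l (pvMem (pvS2 R C a b a.toNat))) = [] := by
  intro f
  cases f with
  | zero => rfl
  | succ f =>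
    simp only [pvDfs, pvDlist, List.getD_cons_succ, List.getD_cons_zero]
    rw [if_neg (by decide : ¬(2 = 4))]
    rw [pvSetCell_mark l _ _ _ (by omega) (by omega) (by omega) (by omega)]
    have hmk : pvMark l (fun r' c' => pvMem (pvS2 R C a b a.toNat) r' c' ||
        ((r' == R - b) && (c' == C - b))) =
        pvMark l (pvMem (pvS2 R C a b (a.toNat + 1))) := by
      apply pvMark_congr
      intro r c _ _ _ _
      rw [pvS2_succ]
      rw [← pvMem_snoc]
      have e1 : R - a - b + (a.toNat : Int) = R - b := by omega
      have e2 : C + a - b - (a.toNat : Int) = C - b := by omega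
      rw [e1, e2]
    rw [hmk]
    rw [if_neg (show ¬(((R:Int), (C:Int)) = (R - b + 1, C - b + -1)) from by
      simp only [Prod.mk.injEq]; omega)]
    by_cases hr : pvInRange l (R - b + 1) (C - b + -1) = false
    · rw [if_pos hr]
    · rw [if_neg hr]
      have hmem : pvMem (pvS2 R C a b (a.toNat + 1)) (R - b + 1) (C - b + -1) = false := by
        simp only [pvMem, decide_eq_false_iff_not, pvS2, pvS1, List.mem_append, pvMem_seg]
        intro h
        rcases h with ((⟨i,hi,e1,e2⟩|⟨i,hi,e1,e2⟩)|⟨i,hi,e1,e2⟩) <;> omega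
      have hr' : pvInRange l (R - b + 1) (C - b + -1) = true := by
        cases hx : pvInRange l (R - b + 1) (C - b + -1) with
        | false => exact absurd hx hr
        | true => rfl
      have hrng : 0 ≤ R - b + 1 ∧ R - b + 1 < l ∧ 0 ≤ C - b + -1 ∧ C - b + -1 < l := by
        simpa only [pvInRange, decide_eq_true_eq] using hr'
      have hget : pvGetCell (pvMark l (pvMem (pvS2 R C a b (a.toNat + 1)))) (R - b + 1) (C - b + -1) = 0 := by
        rw [pvGetCell_mark l _ _ _ (by omega) (by omega) (by omega) (by omega), hmem]
        simp
      rw [if_neg (show ¬(pvGetCell (pvMark l (pvMem (pvS2 R C a b (a.toNat + 1))))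
          (R - b + 1) (C - b + -1) ≠ 0) from by simp [hget])]
      rw [pvDfs3_fail l R C f _ _ (by simp; omega)]
      rw [pvDfs2_fail l R C f _ _ (by simp; omega)]
      rfl

-- the leg-2 walk from cell k of leg 2, prefix marked: it turns successfully exactly
-- at the far corner and emits the full mask once
theorem pvDfs2_main (l R C a b : Int)
    (hRl : R < l) (hC1 : 1 ≤ C) (hCl : C < l) (ha : 1 ≤ a) (hb : 1 ≤ b)
    (hab : 0 ≤ R - a - b) (hCb : 0 ≤ C - b) (hCa : C + a < l) :
    ∀ (f : Nat) (k : Nat), (k : Int) < a → a - (k:Int) + b + 5 ≤ (f:Int) →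
    pvDfs l (R, C) f 2 (R - a - b + (k:Int), C + a - b - (k:Int)) (pvMark l (pvMem (pvS2 R C a b k)))
      = [pvMark l (pvMem (pvCells R C a b))] := by
  intro f
  induction f with
  | zero => intro k hk hf; exfalso; simp at hf; omega
  | succ f ih =>
    intro k hk hf
    simp only [pvDfs, pvDlist, List.getD_cons_succ, List.getD_cons_zero]
    rw [if_neg (by decide : ¬(2 = 4))]
    rw [pvSetCell_mark l _ _ _ (by omega) (by omega) (by omega) (by omega)]
    have hmk : pvMark l (fun r' c' => pvMem (pvS2 R C a b k) r' c' ||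
        ((r' == R - a - b + (k:Int)) && (c' == C + a - b - (k:Int)))) =
        pvMark l (pvMem (pvS2 R C a b (k + 1))) := by
      apply pvMark_congr
      intro r c _ _ _ _
      rw [pvS2_succ, ← pvMem_snoc]
    rw [hmk]
    rw [if_neg (show ¬(((R:Int), (C:Int)) = (R - a - b + (k:Int) + 1, C + a - b - (k:Int) + -1)) from by
      simp only [Prod.mk.injEq]; omega)]
    rw [if_neg (show ¬(pvInRange l (R - a - b + (k:Int) + 1) (C + a - b - (k:Int) + -1) = false) from by
      simp only [pvInRange, decide_eq_false_iff_not]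
      push_neg
      omega)]
    have hmem : pvMem (pvS2 R C a b (k + 1)) (R - a - b + (k:Int) + 1) (C + a - b - (k:Int) + -1) = false := by
      simp only [pvMem, decide_eq_false_iff_not, pvS2, pvS1, List.mem_append, pvMem_seg]
      intro h
      rcases h with ((⟨i,hi,e1,e2⟩|⟨i,hi,e1,e2⟩)|⟨i,hi,e1,e2⟩) <;> omega
    have hget : pvGetCell (pvMark l (pvMem (pvS2 R C a b (k + 1))))
        (R - a - b + (k:Int) + 1) (C + a - b - (k:Int) + -1) = 0 := by
      rw [pvGetCell_mark l _ _ _ (by omega) (by omega) (by omega) (by omega), hmem]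
      simp
    rw [if_neg (show ¬(pvGetCell (pvMark l (pvMem (pvS2 R C a b (k + 1))))
        (R - a - b + (k:Int) + 1) (C + a - b - (k:Int) + -1) ≠ 0) from by simp [hget])]
    by_cases hka : (k : Int) = a - 1
    · have ek : k + 1 = a.toNat := by omega
      have hturn : pvDfs l (R, C) f 3 (R - a - b + (k:Int) + 1, C + a - b - (k:Int) + -1)
          (pvMark l (pvMem (pvS2 R C a b (k + 1)))) = [pvMark l (pvMem (pvCells R C a b))] := by
        have e : ((R:Int) - a - b + (k:Int) + 1, (C:Int) + a - b - (k:Int) + -1) =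
            ((R:Int) - b + ((0:Nat):Int), (C:Int) - b + ((0:Nat):Int)) := by
          simp only [Prod.mk.injEq]; push_cast; omega
        have e3 : pvMark l (pvMem (pvS2 R C a b (k + 1))) = pvMark l (pvMem (pvS3 R C a b 0)) := by
          rw [ek]; simp only [pvS3, pvSeg_zero, List.append_nil]
        rw [e, e3]
        exact pvDfs3_succ l R C a b hRl hC1 hCl ha hb hab hCb hCa f 0 (by push_cast; omega)
          (by push_cast; omega)
      have hcont : pvDfs l (R, C) f 2 (R - a - b + (k:Int) + 1, C + a - b - (k:Int) + -1)
          (pvMark l (pvMem (pvS2 R C a b (k + 1)))) = [] := by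
        have e : ((R:Int) - a - b + (k:Int) + 1, (C:Int) + a - b - (k:Int) + -1) =
            ((R:Int) - b, (C:Int) - b) := by
          simp only [Prod.mk.injEq]; omega
        rw [e, ek]
        exact pvDfs2_end l R C a b hRl hCl ha hb hab hCb hCa f
      rw [hturn, hcont]
      simp
    · have hturn : pvDfs l (R, C) f 3 (R - a - b + (k:Int) + 1, C + a - b - (k:Int) + -1)
          (pvMark l (pvMem (pvS2 R C a b (k + 1)))) = [] :=
        pvDfs3_fail l R C f _ _ (by simp; omega)
      have hcont : pvDfs l (R, C) f 2 (R - a - b + (k:Int) + 1, C + a - b - (k:Int) + -1)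
          (pvMark l (pvMem (pvS2 R C a b (k + 1)))) = [pvMark l (pvMem (pvCells R C a b))] := by
        have e : ((R:Int) - a - b + (k:Int) + 1, (C:Int) + a - b - (k:Int) + -1) =
            ((R:Int) - a - b + ((k+1:Nat):Int), (C:Int) + a - b - ((k+1:Nat):Int)) := by
          simp only [Prod.mk.injEq]; push_cast; omega
        rw [e]
        exact ih (k+1) (by push_cast; omega) (by push_cast; omega)
      rw [hturn, hcont]
      rfl

theorem pvS1_succ (R C a : Int) (m : Nat) :
    pvS1 R C a (m+1) = pvS1 R C a m ++ [(R - a - (m:Int), C + a - (m:Int))] := by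
  simp only [pvS1, pvSeg_snoc, neg_one_mul, ← sub_eq_add_neg, ← List.append_assoc]

-- the leg-1 walk from the m-th cell of leg 1: each further step turns into leg 2
-- with side b = m+1, contributing the mask exactly when b ≤ min(R-a, C)
theorem pvDfs1_main (l R C a : Int)
    (hR1 : 1 ≤ R) (hRl : R < l) (hC1 : 1 ≤ C) (hCl : C < l) (ha : 1 ≤ a)
    (haR : 0 ≤ R - a) (hCa : C + a < l) :
    ∀ (f : Nat) (m : Nat), 0 ≤ C + a - (m:Int) → 0 ≤ R - a - (m:Int) →
      2*R - a - (m:Int) + 6 ≤ (f:Int) →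
    pvDfs l (R, C) f 1 (R - a - (m:Int), C + a - (m:Int)) (pvMark l (pvMem (pvS1 R C a m)))
      = (PySem.List.pyRange ((m:Int)+1) (min (R-a) C + 1) 1).map (fun bb => pvMask l R C a bb) := by
  intro f
  induction f with
  | zero => intro m h1 h2 hf; exfalso; simp at hf; omega
  | succ f ih =>
    intro m hcol hrow hf
    simp only [pvDfs, pvDlist, List.getD_cons_succ, List.getD_cons_zero]
    rw [if_neg (by decide : ¬(1 = 4))]
    rw [pvSetCell_mark l _ _ _ (by omega) (by omega) (by omega) (by omega)]
    have hmk : pvMark l (fun r' c' => pvMem (pvS1 R C a m) r' c' ||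
        ((r' == R - a - (m:Int)) && (c' == C + a - (m:Int)))) =
        pvMark l (pvMem (pvS1 R C a (m + 1))) := by
      apply pvMark_congr
      intro r c _ _ _ _
      rw [pvS1_succ, ← pvMem_snoc]
    rw [hmk]
    rw [if_neg (show ¬(((R:Int), (C:Int)) = (R - a - (m:Int) + -1, C + a - (m:Int) + -1)) from by
      simp only [Prod.mk.injEq]; omega)]
    by_cases hgo : 0 ≤ R - a - (m:Int) - 1 ∧ 0 ≤ C + a - (m:Int) - 1
    · rw [if_neg (show ¬(pvInRange l (R - a - (m:Int) + -1) (C + a - (m:Int) + -1) = false) from by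
        simp only [pvInRange, decide_eq_false_iff_not]
        push_neg
        omega)]
      have hmem : pvMem (pvS1 R C a (m + 1)) (R - a - (m:Int) + -1) (C + a - (m:Int) + -1) = false := by
        simp only [pvMem, decide_eq_false_iff_not, pvS1, List.mem_append, pvMem_seg]
        intro h
        rcases h with (⟨i,hi,e1,e2⟩|⟨i,hi,e1,e2⟩) <;> omega
      have hget : pvGetCell (pvMark l (pvMem (pvS1 R C a (m + 1))))
          (R - a - (m:Int) + -1) (C + a - (m:Int) + -1) = 0 := by
        rw [pvGetCell_mark l _ _ _ (by omega) (by omega) (by omega) (by omega), hmem]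
        simp
      rw [if_neg (show ¬(pvGetCell (pvMark l (pvMem (pvS1 R C a (m + 1))))
          (R - a - (m:Int) + -1) (C + a - (m:Int) + -1) ≠ 0) from by simp [hget])]
      by_cases hbc : (m:Int) + 1 ≤ C
      · have hturn : pvDfs l (R, C) f 2 (R - a - (m:Int) + -1, C + a - (m:Int) + -1)
            (pvMark l (pvMem (pvS1 R C a (m + 1)))) = [pvMask l R C a ((m:Int)+1)] := by
          have ebb : ((m:Int) + 1).toNat = m + 1 := by omega
          have e3 : pvMark l (pvMem (pvS1 R C a (m + 1))) =
              pvMark l (pvMem (pvS2 R C a ((m:Int)+1) 0)) := by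
            simp only [pvS2, ebb, pvSeg_zero, List.append_nil]
          have e : ((R:Int) - a - (m:Int) + -1, (C:Int) + a - (m:Int) + -1) =
              ((R:Int) - a - ((m:Int)+1) + ((0:Nat):Int), (C:Int) + a - ((m:Int)+1) - ((0:Nat):Int)) := by
            simp only [Prod.mk.injEq]; push_cast; omega
          rw [e, e3]
          rw [pvDfs2_main l R C a ((m:Int)+1) hRl hC1 hCl ha (by omega) (by omega) (by omega) hCa
            f 0 (by push_cast; omega) (by push_cast; omega)]
          rw [pvMask_eq l R C a ((m:Int)+1) ha (by omega) (by omega) (by omega) hCa hRl]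
        have hcont : pvDfs l (R, C) f 1 (R - a - (m:Int) + -1, C + a - (m:Int) + -1)
            (pvMark l (pvMem (pvS1 R C a (m + 1)))) =
            (PySem.List.pyRange (((m+1:Nat):Int)+1) (min (R-a) C + 1) 1).map (fun bb => pvMask l R C a bb) := by
          have e : ((R:Int) - a - (m:Int) + -1, (C:Int) + a - (m:Int) + -1) =
              ((R:Int) - a - ((m+1:Nat):Int), (C:Int) + a - ((m+1:Nat):Int)) := by
            simp only [Prod.mk.injEq]; push_cast; omega
          rw [e]
          exact ih (m+1) (by push_cast; omega) (by push_cast; omega) (by push_cast; omega)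
        rw [hturn, hcont]
        rw [PySem.List.pyRange_one_cons (by omega : (m:Int)+1 < min (R-a) C + 1)]
        push_cast
        simp
      · have hturn : pvDfs l (R, C) f 2 (R - a - (m:Int) + -1, C + a - (m:Int) + -1)
            (pvMark l (pvMem (pvS1 R C a (m + 1)))) = [] := by
          apply pvDfs2_fail2 l R C ((m:Int)+1) (by omega) (by omega)
          simp only []
          ring
        have hcont : pvDfs l (R, C) f 1 (R - a - (m:Int) + -1, C + a - (m:Int) + -1)
            (pvMark l (pvMem (pvS1 R C a (m + 1)))) =
            (PySem.List.pyRange (((m+1:Nat):Int)+1) (min (R-a) C + 1) 1).map (fun bb => pvMask l R C a bb) := by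
          have e : ((R:Int) - a - (m:Int) + -1, (C:Int) + a - (m:Int) + -1) =
              ((R:Int) - a - ((m+1:Nat):Int), (C:Int) + a - ((m+1:Nat):Int)) := by
            simp only [Prod.mk.injEq]; push_cast; omega
          rw [e]
          exact ih (m+1) (by push_cast; omega) (by push_cast; omega) (by push_cast; omega)
        rw [hturn, hcont]
        rw [PySem.List.pyRange_one_eq_nil (by omega : min (R-a) C + 1 ≤ (m:Int)+1),
          PySem.List.pyRange_one_eq_nil (by push_cast; omega : min (R-a) C + 1 ≤ ((m+1:Nat):Int)+1)]
        simp
    · rw [if_pos (show pvInRange l (R - a - (m:Int) + -1) (C + a - (m:Int) + -1) = false from by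
        simp only [pvInRange, decide_eq_false_iff_not]
        intro hcon
        exact hgo ⟨by omega, by omega⟩)]
      rw [PySem.List.pyRange_one_eq_nil (by omega : min (R-a) C + 1 ≤ (m:Int)+1)]
      simp

theorem pvS0_succ (R C : Int) (i : Nat) :
    pvSeg R C (-1) 1 (i+1) = pvSeg R C (-1) 1 i ++ [(R - (i:Int), C + (i:Int))] := by
  simp only [pvSeg_snoc, neg_one_mul, one_mul, ← sub_eq_add_neg]

-- the leg-0 walk from the i-th cell of leg 0: each further step turns into leg 1
-- with side a = i+1, contributing that side's masks while a stays in range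
theorem pvDfs0_main (l R C : Int)
    (hR1 : 1 ≤ R) (hRl : R < l) (hC1 : 1 ≤ C) (hCl : C < l) :
    ∀ (f : Nat) (i : Nat), 0 ≤ R - (i:Int) → C + (i:Int) < l →
      2*R - (i:Int) + 8 ≤ (f:Int) →
    pvDfs l (R, C) f 0 (R - (i:Int), C + (i:Int)) (pvMark l (pvMem (pvSeg R C (-1) 1 i)))
      = (PySem.List.pyRange ((i:Int)+1) (min R (l-1-C) + 1) 1).flatMap
          (fun aa => (PySem.List.pyRange 1 (min (R-aa) C + 1) 1).map (fun bb => pvMask l R C aa bb)) := by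
  intro f
  induction f with
  | zero => intro i h1 h2 hf; exfalso; simp at hf; omega
  | succ f ih =>
    intro i hrow hcol hf
    simp only [pvDfs, pvDlist, List.getD_cons_succ, List.getD_cons_zero]
    rw [if_neg (by decide : ¬(0 = 4))]
    rw [pvSetCell_mark l _ _ _ (by omega) (by omega) (by omega) (by omega)]
    have hmk : pvMark l (fun r' c' => pvMem (pvSeg R C (-1) 1 i) r' c' ||
        ((r' == R - (i:Int)) && (c' == C + (i:Int)))) =
        pvMark l (pvMem (pvSeg R C (-1) 1 (i + 1))) := by
      apply pvMark_congr
      intro r c _ _ _ _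
      rw [pvS0_succ, ← pvMem_snoc]
    rw [hmk]
    rw [if_neg (show ¬(((R:Int), (C:Int)) = (R - (i:Int) + -1, C + (i:Int) + 1)) from by
      simp only [Prod.mk.injEq]; omega)]
    by_cases hgo : 0 ≤ R - (i:Int) - 1 ∧ C + (i:Int) + 1 < l
    · rw [if_neg (show ¬(pvInRange l (R - (i:Int) + -1) (C + (i:Int) + 1) = false) from by
        simp only [pvInRange, decide_eq_false_iff_not]
        push_neg
        omega)]
      have hmem : pvMem (pvSeg R C (-1) 1 (i + 1)) (R - (i:Int) + -1) (C + (i:Int) + 1) = false := by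
        simp only [pvMem, decide_eq_false_iff_not, pvMem_seg]
        intro h
        obtain ⟨k, hk, e1, e2⟩ := h
        omega
      have hget : pvGetCell (pvMark l (pvMem (pvSeg R C (-1) 1 (i + 1))))
          (R - (i:Int) + -1) (C + (i:Int) + 1) = 0 := by
        rw [pvGetCell_mark l _ _ _ (by omega) (by omega) (by omega) (by omega), hmem]
        simp
      rw [if_neg (show ¬(pvGetCell (pvMark l (pvMem (pvSeg R C (-1) 1 (i + 1))))
          (R - (i:Int) + -1) (C + (i:Int) + 1) ≠ 0) from by simp [hget])]
      have hturn : pvDfs l (R, C) f 1 (R - (i:Int) + -1, C + (i:Int) + 1)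
          (pvMark l (pvMem (pvSeg R C (-1) 1 (i + 1)))) =
          (PySem.List.pyRange (((0:Nat):Int)+1) (min (R-((i:Int)+1)) C + 1) 1).map
            (fun bb => pvMask l R C ((i:Int)+1) bb) := by
        have ett : ((i:Int) + 1).toNat = i + 1 := by omega
        have e3 : pvMark l (pvMem (pvSeg R C (-1) 1 (i + 1))) =
            pvMark l (pvMem (pvS1 R C ((i:Int)+1) 0)) := by
          simp only [pvS1, ett, pvSeg_zero, List.append_nil]
        have e : ((R:Int) - (i:Int) + -1, (C:Int) + (i:Int) + 1) =
            ((R:Int) - ((i:Int)+1) - ((0:Nat):Int), (C:Int) + ((i:Int)+1) - ((0:Nat):Int)) := by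
          simp only [Prod.mk.injEq]; push_cast; omega
        rw [e, e3]
        exact pvDfs1_main l R C ((i:Int)+1) hR1 hRl hC1 hCl (by omega) (by omega) (by omega)
          f 0 (by push_cast; omega) (by push_cast; omega) (by push_cast; omega)
      have hcont : pvDfs l (R, C) f 0 (R - (i:Int) + -1, C + (i:Int) + 1)
          (pvMark l (pvMem (pvSeg R C (-1) 1 (i + 1)))) =
          (PySem.List.pyRange (((i+1:Nat):Int)+1) (min R (l-1-C) + 1) 1).flatMap
            (fun aa => (PySem.List.pyRange 1 (min (R-aa) C + 1) 1).map (fun bb => pvMask l R C aa bb)) := by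
        have e : ((R:Int) - (i:Int) + -1, (C:Int) + (i:Int) + 1) =
            ((R:Int) - ((i+1:Nat):Int), (C:Int) + ((i+1:Nat):Int)) := by
          simp only [Prod.mk.injEq]; push_cast; omega
        rw [e]
        exact ih (i+1) (by push_cast; omega) (by push_cast; omega) (by push_cast; omega)
      rw [hturn, hcont]
      rw [PySem.List.pyRange_one_cons (by omega : (i:Int)+1 < min R (l-1-C) + 1)]
      rw [List.flatMap_cons]
      push_cast
      simp
    · rw [if_pos (show pvInRange l (R - (i:Int) + -1) (C + (i:Int) + 1) = false from by
        simp only [pvInRange, decide_eq_false_iff_not]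
        intro hcon
        exact hgo ⟨by omega, by omega⟩)]
      rw [PySem.List.pyRange_one_eq_nil (by omega : min R (l-1-C) + 1 ≤ (i:Int)+1)]
      simp

-- per pivot: A's dfs emits exactly B's double loop of masks
theorem pvPivot (l R C : Int) (hR1 : 1 ≤ R) (hRl : R < l) (hC1 : 1 ≤ C) (hCl : C < l) :
    pvDfs l (R, C) (2*l + 8).toNat 0 (R, C) (pvZeroRect l)
      = (PySem.List.pyRange 1 (min R (l-1-C) + 1) 1).flatMap
          (fun aa => (PySem.List.pyRange 1 (min (R-aa) C + 1) 1).map (fun bb => pvMask l R C aa bb)) := by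
  have e0 : pvZeroRect l = pvMark l (pvMem (pvSeg R C (-1) 1 0)) := by
    rw [pvZeroRect_eq_mark]
    apply pvMark_congr
    intro r c _ _ _ _
    simp [pvSeg, pvMem]
  have h := pvDfs0_main l R C hR1 hRl hC1 hCl ((2*l + 8).toNat) 0 (by push_cast; omega)
    (by push_cast; omega)
    (by rw [Int.toNat_of_nonneg (by omega : (0:Int) ≤ 2*l+8)]; push_cast; omega)
  simp only [Int.natCast_zero, sub_zero, add_zero, zero_add] at h
  rw [e0]
  exact h

theorem pvGen_eq (l : Int) : generate_rect_list l = generate_rect_list_alt l := by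
  unfold generate_rect_list generate_rect_list_alt
  apply PySem.List.foldl_congr_mem
  intro acc row hrow
  rw [PySem.List.mem_pyRange_neg_one] at hrow
  apply PySem.List.foldl_congr_mem
  intro acc2 col hcol
  rw [PySem.List.mem_pyRange_one] at hcol
  rw [pvPivot l row col (by omega) (by omega) (by omega) (by omega)]
  have h1 : ∀ (acc3 : List (List (List Int))) (aa : Int),
      (PySem.List.pyRange 1 (min (row-aa) col + 1) 1).foldl
        (fun acc4 bb => acc4 ++ [pvMask l row col aa bb]) acc3
      = acc3 ++ (PySem.List.pyRange 1 (min (row-aa) col + 1) 1).map (fun bb => pvMask l row col aa bb) :=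
    fun acc3 aa => PySem.List.foldl_append_singleton_eq_map _ _ _
  have h2 : List.foldl (fun acc3 aa => List.foldl (fun acc4 bb => acc4 ++ [pvMask l row col aa bb])
        acc3 (PySem.List.pyRange 1 (min (row - aa) col + 1) 1)) acc2
        (PySem.List.pyRange 1 (min row (l - 1 - col) + 1) 1)
      = List.foldl (fun acc3 aa => acc3 ++ List.map (fun bb => pvMask l row col aa bb)
        (PySem.List.pyRange 1 (min (row - aa) col + 1) 1)) acc2
        (PySem.List.pyRange 1 (min row (l - 1 - col) + 1) 1) :=
    PySem.List.foldl_congr_mem _ _ _ _ (fun acc3 aa _ => h1 acc3 aa)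
  rw [h2, PySem.List.foldl_append_eq_flatMap]


-- ===== VERDICT (by name: the statement is the Claim_ definition above) =====
theorem generate_rect_list_spec : Claim_equal_generate_rect_list := by
  intro l _
  unfold Spec_generate_rect_list
  exact pvGen_eq l
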